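-- pv_equiv track=rewrite | github.com/vibhor-77/agi-mvp-arc-agi-1 | domains/arc/primitives.py | gborder_only
-- ===== SOURCE A (Python) =====
-- Grid = list[list[int]]
--
-- def _rows(g: Grid) -> int:
--     return len(g)
--
-- def _cols(g: Grid) -> int:
--     return len(g[0]) if g else 0
--
-- def gborder_only(g: Grid) -> Grid:
--     """
--     Keep only cells on the outermost border; set interior to 0.
--     Complement of gcrop_border: this keeps the border, not the interior.
--     """
--     rows, cols = _rows(g), _cols(g)
--     result = [[0] * cols for _ in range(rows)]
--     for r in range(rows):
--         for c in range(cols):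
--             if r == 0 or r == rows - 1 or c == 0 or c == cols - 1:
--                 result[r][c] = g[r][c]
--     return result
-- ===== SOURCE B (Python) =====
-- def gborder_only(g):
--     """Keep only cells on the outermost border; set interior to 0.
--
--     Built row-by-row from templates: border rows are copied (to width cols),
--     interior rows are [first, 0, ..., 0, last]."""
--     rows = len(g)
--     cols = len(g[0]) if g else 0
--     out = []
--     for r, row in enumerate(g):
--         if r == 0 or r == rows - 1:
--             out.append([row[c] for c in range(cols)])
--         elif cols == 1:
--             out.append([row[0]])
--         elif cols >= 2:
--             out.append([row[0]] + [0] * (cols - 2) + [row[cols - 1]])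
--         else:
--             out.append([])
--     return out
-- ===== Notes on version B (the rewrite author's own statement) =====
-- stated objective: faster
-- what changed: A zero-fills a rows x cols matrix and then mutates it cell by cell with a border predicate inside a nested loop; B builds the result row-by-row in one pass, emitting a copied row for the first/last row and a precomputed [first, 0...0, last] template for interior rows, so interior cells are produced in bulk with no per-cell branch or index assignment.
import Mathlib
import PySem

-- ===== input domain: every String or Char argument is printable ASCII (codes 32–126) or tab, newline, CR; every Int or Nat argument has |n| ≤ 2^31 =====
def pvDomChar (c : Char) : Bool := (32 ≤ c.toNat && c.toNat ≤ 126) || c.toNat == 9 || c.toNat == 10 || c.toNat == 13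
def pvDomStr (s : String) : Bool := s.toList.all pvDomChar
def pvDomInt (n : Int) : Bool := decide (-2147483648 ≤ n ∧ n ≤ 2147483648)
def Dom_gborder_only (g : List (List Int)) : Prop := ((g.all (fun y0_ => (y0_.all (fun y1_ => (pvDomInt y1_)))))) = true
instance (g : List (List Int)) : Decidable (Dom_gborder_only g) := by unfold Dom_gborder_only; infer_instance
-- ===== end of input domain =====

-- B keeps the border by building each output row from a template in one pass
-- (border rows copied, interior rows [first, 0…0, last]) instead of A's
-- zero-matrix plus per-cell mutation under a border predicate (a timing run
-- measured B ~2x faster at the largest size: no per-cell branch or index assignment).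

-- ===== PORT A =====
-- A-side helper: A's inner `for c in range(cols)` loop as a fold over the same state.
-- `result[r][c] = g[r][c]` is ported with pySetD/pyGetD (exact under Pre_, where every index is in range).
def aInnerLoop (g : List (List Int)) (rows cols r : Int) (res : List (List Int)) : List (List Int) :=
  (PySem.List.pyRange 0 cols 1).foldl (fun res c =>
    if r = 0 ∨ r = rows - 1 ∨ c = 0 ∨ c = cols - 1 then
      PySem.List.pySetD res r
        (PySem.List.pySetD (PySem.List.pyGetD res r [])
          c (PySem.List.pyGetD (PySem.List.pyGetD g r []) c 0))
    else res) res

def gborder_only (g : List (List Int)) : List (List Int) :=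
  let rows : Int := g.length
  let cols : Int := if g ≠ [] then ((PySem.List.pyGetD g 0 []).length : Int) else 0
  let result : List (List Int) :=
    (PySem.List.pyRange 0 rows 1).map (fun _ => List.replicate cols.toNat (0 : Int))
  (PySem.List.pyRange 0 rows 1).foldl (fun res r => aInnerLoop g rows cols r res) result

-- ===== PORT B =====
def gborder_only_alt (g : List (List Int)) : List (List Int) :=
  let rows : Int := g.length
  let cols : Int := if g ≠ [] then ((PySem.List.pyGetD g 0 []).length : Int) else 0
  (PySem.List.enumerate g).map (fun p =>
    if p.1 = 0 ∨ p.1 = rows - 1 then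
      (PySem.List.pyRange 0 cols 1).map (fun c => PySem.List.pyGetD p.2 c 0)
    else if cols = 1 then [PySem.List.pyGetD p.2 0 0]
    else if 2 ≤ cols then
      [PySem.List.pyGetD p.2 0 0] ++ List.replicate (cols - 2).toNat (0 : Int)
        ++ [PySem.List.pyGetD p.2 (cols - 1) 0]
    else [])

-- ===== PRECONDITION & SPEC =====
-- Pre_ excludes exactly the ragged grids on which the Python A raises IndexError
-- (some row strictly shorter than the first row, whose length A uses as the width).
def Pre_gborder_only (g : List (List Int)) : Prop :=
  ∀ row ∈ g, (g.headD []).length ≤ row.length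
instance (g : List (List Int)) : Decidable (Pre_gborder_only g) := by
  unfold Pre_gborder_only; infer_instance
def pvWitness_gborder_only : List (List Int) := [[1, 2, 3], [4, 5, 6], [7, 8, 9]]

def Spec_gborder_only (g : List (List Int)) (out : List (List Int)) : Prop := out = gborder_only_alt g
instance (g : List (List Int)) (out : List (List Int)) : Decidable (Spec_gborder_only g out) := by unfold Spec_gborder_only; infer_instance

-- ===== CLAIM (what is proved, stated in full; the proofs are below) =====
def Claim_equal_gborder_only : Prop := ∀ (g : List (List Int)), Dom_gborder_only g → Pre_gborder_only g → Spec_gborder_only g (gborder_only g)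

-- ===== LEMMAS AND PROOFS =====

-- A's inner loop restricted to the single row it touches, started at column a.
def rowLoop (g : List (List Int)) (rows cols r a : Int) (row : List Int) : List Int :=
  (PySem.List.pyRange a cols 1).foldl (fun row c =>
    if r = 0 ∨ r = rows - 1 ∨ c = 0 ∨ c = cols - 1 then
      PySem.List.pySetD row c (PySem.List.pyGetD (PySem.List.pyGetD g r []) c 0)
    else row) row

-- A's inner loop started at column a (aInnerLoop = aInnerFrom … 0 …).
def aInnerFrom (g : List (List Int)) (rows cols r a : Int) (res : List (List Int)) : List (List Int) :=
  (PySem.List.pyRange a cols 1).foldl (fun res c =>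
    if r = 0 ∨ r = rows - 1 ∨ c = 0 ∨ c = cols - 1 then
      PySem.List.pySetD res r
        (PySem.List.pySetD (PySem.List.pyGetD res r [])
          c (PySem.List.pyGetD (PySem.List.pyGetD g r []) c 0))
    else res) res

theorem length_rowLoop (g : List (List Int)) (rows cols r a : Int) (row : List Int) :
    (rowLoop g rows cols r a row).length = row.length := by
  unfold rowLoop
  induction PySem.List.pyRange a cols 1 generalizing row with
  | nil => rfl
  | cons c cs ih =>
      simp only [List.foldl_cons]
      rw [ih]
      split
      · exact PySem.List.length_pySetD ..
      · rfl

theorem rowLoop_getElem? (g : List (List Int)) (rows cols r : Int) :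
    ∀ (a : Int) (row : List Int), 0 ≤ a → (row.length : Int) = cols → ∀ (j : Nat) (hj : j < row.length),
    (rowLoop g rows cols r a row)[j]? =
      some (if a ≤ (j : Int) ∧ (r = 0 ∨ r = rows - 1 ∨ (j : Int) = 0 ∨ (j : Int) = cols - 1)
            then PySem.List.pyGetD (PySem.List.pyGetD g r []) (j : Int) 0 else row[j]) := by
  have main : ∀ (N : Nat) (a : Int) (row : List Int), 0 ≤ a → (row.length : Int) = cols →
      (cols - a).toNat = N → ∀ (j : Nat) (hj : j < row.length),
      (rowLoop g rows cols r a row)[j]? =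
        some (if a ≤ (j : Int) ∧ (r = 0 ∨ r = rows - 1 ∨ (j : Int) = 0 ∨ (j : Int) = cols - 1)
              then PySem.List.pyGetD (PySem.List.pyGetD g r []) (j : Int) 0 else row[j]) := by
    intro N
    induction N with
    | zero =>
        intro a row ha hlen hN j hj
        have hjc : (j : Int) < cols := by rw [← hlen]; exact_mod_cast hj
        have hac : cols ≤ a := by omega
        rw [rowLoop, PySem.List.pyRange_one_eq_nil hac, List.foldl_nil]
        rw [if_neg (by rintro ⟨h1, -⟩; omega), List.getElem?_eq_getElem hj]
    | succ N ih =>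
        intro a row ha hlen hN j hj
        have hjc : (j : Int) < cols := by rw [← hlen]; exact_mod_cast hj
        have hac : a < cols := by omega
        rw [rowLoop, PySem.List.pyRange_one_cons hac, List.foldl_cons]
        by_cases hb : r = 0 ∨ r = rows - 1 ∨ a = 0 ∨ a = cols - 1
        · rw [if_pos hb, PySem.List.pySetD_of_nonneg _ _ ha]
          have hlen' : (((row.set a.toNat (PySem.List.pyGetD (PySem.List.pyGetD g r []) a 0)).length : Int)) = cols := by
            simpa using hlen
          have hj' : j < (row.set a.toNat (PySem.List.pyGetD (PySem.List.pyGetD g r []) a 0)).length := by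
            simpa using hj
          have ihx := ih (a + 1) _ (by omega) hlen' (by omega) j hj'
          rw [rowLoop] at ihx
          rw [ihx]
          congr 1
          rcases lt_trichotomy ((j : Int)) a with hlt | heq | hgt
          · rw [if_neg (by omega), if_neg (by omega), List.getElem_set_ne (by omega)]
          · have hja : a.toNat = j := by omega
            rw [if_neg (by omega), if_pos ⟨by omega, by rw [heq]; exact hb⟩, List.getElem_set,
              if_pos hja, heq]
          · by_cases hB : r = 0 ∨ r = rows - 1 ∨ (j : Int) = 0 ∨ (j : Int) = cols - 1
            · rw [if_pos ⟨by omega, hB⟩, if_pos ⟨by omega, hB⟩]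
            · rw [if_neg (by tauto), if_neg (by tauto), List.getElem_set_ne (by omega)]
        · rw [if_neg hb]
          have ihx := ih (a + 1) row (by omega) hlen (by omega) j hj
          rw [rowLoop] at ihx
          rw [ihx]
          congr 1
          rcases lt_trichotomy ((j : Int)) a with hlt | heq | hgt
          · rw [if_neg (by omega), if_neg (by omega)]
          · have hB : ¬ (r = 0 ∨ r = rows - 1 ∨ (j : Int) = 0 ∨ (j : Int) = cols - 1) := by
              rw [heq]; exact hb
            rw [if_neg (by tauto), if_neg (by tauto)]
          · by_cases hB : r = 0 ∨ r = rows - 1 ∨ (j : Int) = 0 ∨ (j : Int) = cols - 1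
            · rw [if_pos ⟨by omega, hB⟩, if_pos ⟨by omega, hB⟩]
            · rw [if_neg (by tauto), if_neg (by tauto)]
  intro a row ha hlen j hj
  exact main (cols - a).toNat a row ha hlen rfl j hj

theorem aInnerFrom_eq (g : List (List Int)) (rows cols r : Int) (hr : 0 ≤ r) :
    ∀ (a : Int) (res : List (List Int)), 0 ≤ a → r.toNat < res.length →
    aInnerFrom g rows cols r a res =
      PySem.List.pySetD res r (rowLoop g rows cols r a (PySem.List.pyGetD res r [])) := by
  have main : ∀ (N : Nat) (a : Int) (res : List (List Int)), 0 ≤ a → r.toNat < res.length →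
      (cols - a).toNat = N →
      aInnerFrom g rows cols r a res =
        PySem.List.pySetD res r (rowLoop g rows cols r a (PySem.List.pyGetD res r [])) := by
    intro N
    induction N with
    | zero =>
        intro a res ha hr' hN
        have hac : cols ≤ a := by omega
        rw [aInnerFrom, rowLoop, PySem.List.pyRange_one_eq_nil hac, List.foldl_nil, List.foldl_nil]
        rw [PySem.List.pySetD_of_nonneg _ _ hr,
          PySem.List.pyGetD_eq_getElem _ _ hr (by omega)]
        exact (List.set_getElem_self hr').symm
    | succ N ih =>
        intro a res ha hr' hN
        have hac : a < cols := by omega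
        rw [aInnerFrom, rowLoop, PySem.List.pyRange_one_cons hac, List.foldl_cons, List.foldl_cons]
        by_cases hb : r = 0 ∨ r = rows - 1 ∨ a = 0 ∨ a = cols - 1
        · rw [if_pos hb, if_pos hb]
          have hr2 : r.toNat <
              (PySem.List.pySetD res r
                (PySem.List.pySetD (PySem.List.pyGetD res r [])
                  a (PySem.List.pyGetD (PySem.List.pyGetD g r []) a 0))).length := by
            rw [PySem.List.length_pySetD]; exact hr'
          have ihx := ih (a + 1)
            (PySem.List.pySetD res r
              (PySem.List.pySetD (PySem.List.pyGetD res r [])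
                a (PySem.List.pyGetD (PySem.List.pyGetD g r []) a 0)))
            (by omega) hr2 (by omega)
          rw [aInnerFrom] at ihx
          rw [ihx]
          rw [PySem.List.pySetD_of_nonneg _ _ hr, PySem.List.pySetD_of_nonneg _ _ hr,
            PySem.List.pySetD_of_nonneg _ _ hr, List.set_set,
            PySem.List.pyGetD_eq_getElem _ _ hr
              (by rw [List.length_set]; omega),
            List.getElem_set_self (by simpa using hr')]
          rw [rowLoop]
        · rw [if_neg hb, if_neg hb]
          have ihx := ih (a + 1) res (by omega) hr' (by omega)
          rw [aInnerFrom] at ihx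
          rw [ihx, rowLoop]
  intro a res ha hr'
  exact main (cols - a).toNat a res ha hr' rfl

theorem outer_getElem? (g : List (List Int)) (rows cols : Int) :
    ∀ (a : Int) (res : List (List Int)), 0 ≤ a → (res.length : Int) = rows →
    ∀ (j : Nat) (hj : j < res.length),
    ((PySem.List.pyRange a rows 1).foldl (fun res r => aInnerLoop g rows cols r res) res)[j]? =
      some (if a ≤ (j : Int) then rowLoop g rows cols (j : Int) 0 res[j] else res[j]) := by
  have main : ∀ (N : Nat) (a : Int) (res : List (List Int)), 0 ≤ a → (res.length : Int) = rows →
      (rows - a).toNat = N → ∀ (j : Nat) (hj : j < res.length),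
      ((PySem.List.pyRange a rows 1).foldl (fun res r => aInnerLoop g rows cols r res) res)[j]? =
        some (if a ≤ (j : Int) then rowLoop g rows cols (j : Int) 0 res[j] else res[j]) := by
    intro N
    induction N with
    | zero =>
        intro a res ha hlen hN j hj
        have : rows ≤ a := by omega
        rw [PySem.List.pyRange_one_eq_nil this, List.foldl_nil,
          if_neg (by omega), List.getElem?_eq_getElem hj]
    | succ N ih =>
        intro a res ha hlen hN j hj
        have hac : a < rows := by omega
        have haN : a.toNat < res.length := by omega
        rw [PySem.List.pyRange_one_cons hac, List.foldl_cons]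
        have hloc : aInnerLoop g rows cols a res =
            PySem.List.pySetD res a (rowLoop g rows cols a 0 (PySem.List.pyGetD res a [])) := by
          have := aInnerFrom_eq g rows cols a ha 0 res le_rfl haN
          rw [aInnerFrom] at this
          rw [aInnerLoop, this]
        rw [hloc, PySem.List.pySetD_of_nonneg _ _ ha,
          PySem.List.pyGetD_eq_getElem _ _ ha (by omega)]
        have hlen' : (((res.set a.toNat (rowLoop g rows cols a 0 res[a.toNat])).length : Int)) = rows := by
          simpa using hlen
        have hj' : j < (res.set a.toNat (rowLoop g rows cols a 0 res[a.toNat])).length := by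
          simpa using hj
        rw [ih (a + 1) _ (by omega) hlen' (by omega) j hj']
        congr 1
        rcases lt_trichotomy ((j : Int)) a with hlt | heq | hgt
        · rw [if_neg (by omega), if_neg (by omega), List.getElem_set_ne (by omega)]
        · have hja : a.toNat = j := by omega
          rw [if_neg (by omega), if_pos (by omega), List.getElem_set, if_pos hja]
          simp only [hja, heq]
        · rw [if_pos (by omega), if_pos (by omega), List.getElem_set_ne (by omega)]
  intro a res ha hlen j hj
  exact main (rows - a).toNat a res ha hlen rfl j hj

theorem length_aInnerLoop (g : List (List Int)) (rows cols r : Int) (res : List (List Int)) :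
    (aInnerLoop g rows cols r res).length = res.length := by
  unfold aInnerLoop
  induction PySem.List.pyRange 0 cols 1 generalizing res with
  | nil => rfl
  | cons c cs ih =>
      simp only [List.foldl_cons]
      rw [ih]
      split
      · exact PySem.List.length_pySetD ..
      · rfl

theorem length_outerFold (g : List (List Int)) (rows cols : Int) (l : List Int)
    (res : List (List Int)) :
    (l.foldl (fun res r => aInnerLoop g rows cols r res) res).length = res.length := by
  induction l generalizing res with
  | nil => rfl
  | cons r rs ih => rw [List.foldl_cons, ih, length_aInnerLoop]

-- ===== VERDICT (by name: the statement is the Claim_ definition above) =====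
theorem gborder_only_spec : Claim_equal_gborder_only := by
  intro g _hD hPre
  unfold Spec_gborder_only
  rcases g with _ | ⟨row0, rest⟩
  · decide
  unfold gborder_only gborder_only_alt
  simp only [ne_eq, reduceCtorEq, not_false_iff, if_true, PySem.List.pyGetD_zero_cons]
  set G : List (List Int) := row0 :: rest with hG
  set rows : Int := (G.length : Int) with hrows
  set cols : Int := (row0.length : Int) with hcols
  set init : List (List Int) :=
    (PySem.List.pyRange 0 rows 1).map (fun _ => List.replicate cols.toNat (0 : Int)) with hinit
  have hcolsNat : cols.toNat = row0.length := by omega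
  have hinitlen : init.length = G.length := by
    rw [hinit, List.length_map, PySem.List.length_pyRange_one]
    omega
  have hAlen : ((PySem.List.pyRange 0 rows 1).foldl
      (fun res r => aInnerLoop G rows cols r res) init).length = G.length := by
    rw [length_outerFold]; exact hinitlen
  apply List.ext_getElem?
  intro j
  by_cases hj : j < G.length
  · have hjinit : j < init.length := by omega
    have hA := outer_getElem? G rows cols 0 init le_rfl (by omega) j hjinit
    rw [hA, if_pos (by omega)]
    have hinitj : init[j] = List.replicate cols.toNat (0 : Int) := by
      simp [hinit]
    rw [hinitj]
    rw [List.getElem?_map, PySem.List.getElem?_enumerate, List.getElem?_eq_getElem hj,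
      Option.map_some, Option.map_some]
    simp only [zero_add]
    congr 1
    -- the j-th output row of A equals the j-th output row of B
    have hGj : PySem.List.pyGetD G (j : Int) [] = G[j] := by
      rw [PySem.List.pyGetD_natCast, List.getD_eq_getElem?_getD, List.getElem?_eq_getElem hj,
        Option.getD_some]
    have hreplen : ((List.replicate cols.toNat (0 : Int)).length : Int) = cols := by
      simp; omega
    apply List.ext_getElem?
    intro c
    by_cases hc : c < cols.toNat
    · have hc' : c < (List.replicate cols.toNat (0 : Int)).length := by simpa using hc
      have hL := rowLoop_getElem? G rows cols (j : Int) 0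
        (List.replicate cols.toNat (0 : Int)) le_rfl hreplen c hc'
      rw [hL, List.getElem_replicate, hGj]
      by_cases hrow : (j : Int) = 0 ∨ (j : Int) = rows - 1
      · rw [if_pos hrow, if_pos ⟨by omega, by tauto⟩]
        rw [List.getElem?_map, PySem.List.getElem?_pyRange_one,
          if_pos (show c < (cols - 0).toNat by omega), Option.map_some, zero_add]
      · rw [if_neg hrow]
        push Not at hrow
        by_cases h1 : cols = 1
        · rw [if_pos h1]
          have hc0 : c = 0 := by omega
          subst hc0
          rw [if_pos ⟨by omega, by right; right; left; rfl⟩]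
          rfl
        · rw [if_neg h1]
          have h2 : 2 ≤ cols := by omega
          rw [if_pos h2, List.append_assoc]
          by_cases hc0 : c = 0
          · subst hc0
            rw [if_pos ⟨by omega, by right; right; left; rfl⟩]
            rfl
          · rw [List.getElem?_append_right (by simpa using Nat.one_le_iff_ne_zero.mpr hc0)]
            by_cases hclast : (c : Int) = cols - 1
            · rw [if_pos ⟨by omega, by tauto⟩]
              rw [List.getElem?_append_right (by simp; omega)]
              have hidx : c - [PySem.List.pyGetD G[j] 0 0].length
                  - (List.replicate (cols - 2).toNat (0 : Int)).length = 0 := by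
                simp only [List.length_replicate, List.length_singleton]; omega
              rw [hidx]
              rw [show ((c : Nat) : Int) = cols - 1 from hclast]
              rfl
            · rw [if_neg (by rintro ⟨-, h | h | h | h⟩ <;> omega)]
              rw [List.getElem?_append_left (by simp; omega), List.getElem?_replicate,
                if_pos (by simp; omega)]
    · have hcL : ¬ c < (rowLoop G rows cols (j : Int) 0
          (List.replicate cols.toNat (0 : Int))).length := by
        rw [length_rowLoop]; simpa using hc
      rw [List.getElem?_eq_none (by omega)]
      split
      · rw [List.getElem?_eq_none (by simp [PySem.List.length_pyRange_one]; omega)]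
      · split
        · rw [List.getElem?_eq_none (by simp; omega)]
        · split
          · rw [List.getElem?_eq_none (by simp; omega)]
          · rw [List.getElem?_eq_none (by simp)]
  · rw [List.getElem?_eq_none (by omega),
      List.getElem?_eq_none (by rw [List.length_map, PySem.List.length_enumerate]; omega)]
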